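-- pv_equiv track=rewrite | github.com/marinov98/AoC | 2023/day_18/day_18_puzzle_failure.py | check_if_inside
-- ===== SOURCE A (Python) =====
-- def check_if_inside(c: int, grid_row: list) -> int:
--     curr = c - 1
--     passes = 0
--     while curr > -1:
--         if grid_row[curr] == "#":
--             while curr > -1 and grid_row[curr] == "#":
--                 curr -= 1
--             passes += 1
--         else:
--             curr -= 1
--
--     return 0 if passes % 2 == 0 else 1
-- ===== SOURCE B (Python) =====
-- def check_if_inside(c: int, grid_row: list) -> int:
--     passes = 0
--     prev_is_hash = False
--     for i in range(c):
--         is_hash = grid_row[i] == "#"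
--         if is_hash and not prev_is_hash:
--             passes += 1
--         prev_is_hash = is_hash
--     return passes % 2
-- ===== Notes on version B (the rewrite author's own statement) =====
-- stated objective: simpler
-- what changed: Replaces A's right-to-left nested while loops (outer scan plus inner run-skipping loop) with a single left-to-right for loop that counts block starts via a prev_is_hash flag and returns passes % 2 directly.
import Mathlib
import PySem

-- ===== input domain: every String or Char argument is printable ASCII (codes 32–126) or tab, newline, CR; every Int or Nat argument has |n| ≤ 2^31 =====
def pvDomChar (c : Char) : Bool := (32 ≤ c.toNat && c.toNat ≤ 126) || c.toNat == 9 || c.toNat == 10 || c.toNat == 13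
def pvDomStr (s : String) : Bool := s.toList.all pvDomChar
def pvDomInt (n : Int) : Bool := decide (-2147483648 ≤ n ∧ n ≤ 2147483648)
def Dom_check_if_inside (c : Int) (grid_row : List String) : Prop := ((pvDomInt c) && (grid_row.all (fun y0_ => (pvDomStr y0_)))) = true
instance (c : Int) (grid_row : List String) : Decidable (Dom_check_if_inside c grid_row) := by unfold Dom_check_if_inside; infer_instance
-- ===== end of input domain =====

-- B replaces A's right-to-left nested while loops with one left-to-right pass
-- counting block starts with a previous-cell flag; objective: simpler.

-- ===== PORT A =====
-- the test 'grid_row[curr] == "#"' (out-of-range excluded by Pre_)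
def pvHashAt (grid_row : List String) (i : Int) : Bool :=
  ((PySem.List.pyGet? grid_row i).getD "") == "#"

-- inner 'while curr > -1 and grid_row[curr] == "#": curr -= 1';
-- state tracked as n = curr + 1 (a Nat, since the loops stop at curr = -1)
def pvSkip (grid_row : List String) : Nat → Nat
  | 0 => 0
  | n + 1 => if pvHashAt grid_row (n : Int) then pvSkip grid_row n else n + 1

theorem pvSkip_le (grid_row : List String) : ∀ n, pvSkip grid_row n ≤ n := by
  intro n
  induction n with
  | zero => simp [pvSkip]
  | succ k ih => simp only [pvSkip]; split <;> omega

-- outer 'while curr > -1: …', again with n = curr + 1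
-- outer 'while curr > -1: ...', again with n = curr + 1
def pvOuter (grid_row : List String) : Nat → Int → Int
  | 0, passes => passes
  | n + 1, passes =>
    if pvHashAt grid_row (n : Int) then
      pvOuter grid_row (pvSkip grid_row (n + 1)) (passes + 1)
    else
      pvOuter grid_row n passes
  termination_by n _ => n
  decreasing_by
    · have h := pvSkip_le grid_row n
      simp only [pvSkip]
      split <;> omega
    · omega

def check_if_inside (c : Int) (grid_row : List String) : Int :=
  -- curr = c - 1, i.e. n = curr + 1 = c (and 0 iterations when c ≤ 0)
  let passes := pvOuter grid_row c.toNat 0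
  if passes % 2 == 0 then 0 else 1

-- ===== PORT B =====
def check_if_inside_alt (c : Int) (grid_row : List String) : Int :=
  let st := (PySem.List.pyRange 0 c 1).foldl
    (fun (st : Int × Bool) i =>
      let is_hash := ((PySem.List.pyGet? grid_row i).getD "") == "#"
      ((if is_hash && !st.2 then st.1 + 1 else st.1), is_hash))
    (0, false)
  PySem.Int.mod st.1 2

-- ===== PRECONDITION & SPEC =====
-- A raises IndexError iff it reads grid_row[c-1] with c > len(grid_row); Pre_ excludes exactly that.
def Pre_check_if_inside (c : Int) (grid_row : List String) : Prop :=
  c ≤ (grid_row.length : Int)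
instance (c : Int) (grid_row : List String) : Decidable (Pre_check_if_inside c grid_row) := by
  unfold Pre_check_if_inside; infer_instance
def pvWitness_check_if_inside : Int × List String := (3, ["#", ".", "#"])
def Spec_check_if_inside (c : Int) (grid_row : List String) (out : Int) : Prop := out = check_if_inside_alt c grid_row
instance (c : Int) (grid_row : List String) (out : Int) : Decidable (Spec_check_if_inside c grid_row out) := by unfold Spec_check_if_inside; infer_instance

-- ===== CLAIM (what is proved, stated in full; the proofs are below) =====
def Claim_equal_check_if_inside : Prop := ∀ (c : Int) (grid_row : List String), Dom_check_if_inside c grid_row → Pre_check_if_inside c grid_row → Spec_check_if_inside c grid_row (check_if_inside c grid_row)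

-- ===== LEMMAS AND PROOFS =====

-- B's fold state after processing indices 0..n-1, as a function of the hash predicate
def pvF (h : Nat → Bool) : Nat → Int × Bool
  | 0 => ((0 : Int), false)
  | n + 1 =>
    let p := pvF h n
    ((if h n && !p.2 then p.1 + 1 else p.1), h n)

theorem pvF_fst_nonneg (h : Nat → Bool) : ∀ n, 0 ≤ (pvF h n).1 := by
  intro n
  induction n with
  | zero => simp [pvF]
  | succ k ih => simp only [pvF]; split <;> omega

-- everything in [pvSkip g n, n) is '#'
theorem pvSkip_all (g : List String) : ∀ n k, pvSkip g n ≤ k → k < n →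
    pvHashAt g (k : Int) = true := by
  intro n
  induction n with
  | zero => intro k h1 h2; omega
  | succ m ih =>
    intro k h1 h2
    by_cases hm : pvHashAt g (m : Int) = true
    · rcases Nat.lt_or_ge k m with hk | hk
      · exact ih k (by simpa [pvSkip, hm] using h1) hk
      · have : k = m := by omega
        simpa [this] using hm
    · simp [pvSkip, hm] at h1; omega

-- the cell just left of pvSkip g n is not '#' (or there is none)
theorem pvSkip_stop (g : List String) : ∀ n, pvSkip g n = 0 ∨
    pvHashAt g ((pvSkip g n - 1 : Nat) : Int) = false := by
  intro n
  induction n with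
  | zero => left; simp [pvSkip]
  | succ m ih =>
    by_cases hm : pvHashAt g (m : Int) = true
    · simpa [pvSkip, hm] using ih
    · right
      simp only [pvSkip, hm]
      simpa using hm

-- while inside a run of '#', the fold's count does not change and its flag is true
theorem pvF_run (h : Nat → Bool) (m : Nat) : ∀ n, m < n → (∀ k, m ≤ k → k < n → h k = true) →
    (pvF h n).1 = (pvF h (m + 1)).1 ∧ (pvF h n).2 = true := by
  intro n
  induction n with
  | zero => intro h1; omega
  | succ p ih =>
    intro h1 h2
    have hp : h p = true := h2 p (by omega) (by omega)
    rcases Nat.lt_or_ge m p with hmp | hmp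
    · have hprev := ih hmp (fun k hk1 hk2 => h2 k hk1 (by omega))
      constructor
      · show (if h p && !(pvF h p).2 then (pvF h p).1 + 1 else (pvF h p).1) = _
        rw [hp, hprev.2, hprev.1]
        simp
      · show h p = true
        exact hp
    · have heq : p = m := by omega
      subst heq
      constructor
      · rfl
      · show h p = true
        exact hp

-- main invariant: A's outer loop adds the number of blocks counted by B's fold
theorem pvOuter_eq_F (g : List String) : ∀ n p,
    pvOuter g n p = p + (pvF (fun k => pvHashAt g (k : Int)) n).1 := by
  intro n
  induction n using Nat.strong_induction_on with
  | _ n ih =>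
    intro p
    cases n with
    | zero => simp [pvOuter, pvF]
    | succ n =>
      by_cases hn : pvHashAt g (n : Int) = true
      · have hskip : pvSkip g (n + 1) ≤ n := by
          have := pvSkip_le g n
          simp only [pvSkip, hn, if_pos]
          omega
        have hrun : ∀ k, pvSkip g (n + 1) ≤ k → k < n + 1 → pvHashAt g (k : Int) = true :=
          fun k h1 h2 => pvSkip_all g (n + 1) k h1 h2
        have hstep : (pvF (fun k => pvHashAt g (k : Int)) (n + 1)).1 =
            (pvF (fun k => pvHashAt g (k : Int)) (pvSkip g (n + 1))).1 + 1 := by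
          have hmh : pvHashAt g ((pvSkip g (n + 1) : Nat) : Int) = true :=
            hrun _ (le_refl _) (by omega)
          have hflag : (pvF (fun k => pvHashAt g (k : Int)) (pvSkip g (n + 1))).2 = false := by
            rcases pvSkip_stop g (n + 1) with h0 | h0
            · rw [h0]; rfl
            · cases hq : pvSkip g (n + 1) with
              | zero => rfl
              | succ q =>
                show pvHashAt g (q : Int) = false
                rw [hq] at h0
                simpa using h0
          have hFm1 : (pvF (fun k => pvHashAt g (k : Int)) (pvSkip g (n + 1) + 1)).1 =
              (pvF (fun k => pvHashAt g (k : Int)) (pvSkip g (n + 1))).1 + 1 := by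
            show (if pvHashAt g ((pvSkip g (n+1) : Nat) : Int) && !(pvF (fun k => pvHashAt g (k : Int)) (pvSkip g (n + 1))).2 then _ + 1 else _) = _
            rw [hmh, hflag]
            simp
          rcases Nat.lt_or_ge (pvSkip g (n + 1)) n with hlt | hge
          · have := pvF_run (fun k => pvHashAt g (k : Int)) (pvSkip g (n + 1)) (n + 1) (by omega) hrun
            rw [this.1, hFm1]
          · have : pvSkip g (n + 1) = n := by omega
            rw [this] at hFm1 ⊢
            exact hFm1
        rw [hstep]
        rw [pvOuter, if_pos hn]
        rw [ih (pvSkip g (n + 1)) (by omega) (p + 1)]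
        omega
      · have hnf : pvHashAt g (n : Int) = false := by simpa using hn
        rw [pvOuter, if_neg (by simp [hnf])]
        rw [ih n (by omega) p]
        have : (pvF (fun k => pvHashAt g (k : Int)) (n + 1)).1 =
            (pvF (fun k => pvHashAt g (k : Int)) n).1 := by
          show (if pvHashAt g (n : Int) && _ then _ + 1 else _) = _
          rw [hnf]
          simp
        rw [this]

-- B's fold over pyRange 0 c equals pvF at c.toNat
theorem pvFold_eq_F (g : List String) (c : Int) :
    (PySem.List.pyRange 0 c 1).foldl
      (fun (st : Int × Bool) i =>
        let is_hash := ((PySem.List.pyGet? g i).getD "") == "#"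
        ((if is_hash && !st.2 then st.1 + 1 else st.1), is_hash))
      (0, false)
    = pvF (fun k => pvHashAt g (k : Int)) c.toNat := by
  rw [PySem.List.pyRange_one]
  have h0 : (c - 0).toNat = c.toNat := by omega
  rw [h0]
  induction c.toNat with
  | zero => simp [pvF]
  | succ n ih =>
    rw [List.range_succ]
    simp only [List.map_append, List.foldl_append, ih]
    simp [pvF, pvHashAt]

-- ===== VERDICT (by name: the statement is the Claim_ definition above) =====
theorem check_if_inside_spec : Claim_equal_check_if_inside := by
  intro c g _ _
  unfold Spec_check_if_inside check_if_inside check_if_inside_alt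
  simp only [pvFold_eq_F, pvOuter_eq_F, zero_add]
  have hnn := pvF_fst_nonneg (fun k => pvHashAt g (k : Int)) c.toNat
  set x := (pvF (fun k => pvHashAt g (k : Int)) c.toNat).1 with hx
  rw [PySem.Int.mod_eq_emod_of_pos (by omega : (0:Int) < 2)]
  rcases Int.emod_two_eq_zero_or_one x with h | h <;> simp [h]
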